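-- pv_equiv track=rewrite | github.com/Ghukii/DSBot | DSBot/main.py | sort_sost
-- ===== SOURCE A (Python) =====
-- def sort_sost(a):
--     out = [''] * 5
--     for i in a:
--         if 'Factory New' in i:
--             out[0] = i
--         if 'Minimal Wear' in i:
--             out[1] = i
--         if 'Well-Worn' in i:
--             out[2] = i
--         if 'Field-Tested' in i:
--             out[3] = i
--         if 'Battle-Scarred' in i:
--             out[4] = i
--     out = list(filter(lambda x: x != '', out))
--     return out
-- ===== SOURCE B (Python) =====
-- CATEGORIES = ['Factory New', 'Minimal Wear', 'Well-Worn', 'Field-Tested', 'Battle-Scarred']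
--
-- def sort_sost(a):
--     out = []
--     for cat in CATEGORIES:
--         hit = next((i for i in reversed(a) if cat in i), None)
--         if hit is not None:
--             out.append(hit)
--     return out
-- ===== Notes on version B (the rewrite author's own statement) =====
-- stated objective: alternative
-- what changed: Instead of one pass over the items updating a 5-slot array then filtering empties, B scans the reversed list once per fixed category for the first match and appends it only when found.
import Mathlib
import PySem

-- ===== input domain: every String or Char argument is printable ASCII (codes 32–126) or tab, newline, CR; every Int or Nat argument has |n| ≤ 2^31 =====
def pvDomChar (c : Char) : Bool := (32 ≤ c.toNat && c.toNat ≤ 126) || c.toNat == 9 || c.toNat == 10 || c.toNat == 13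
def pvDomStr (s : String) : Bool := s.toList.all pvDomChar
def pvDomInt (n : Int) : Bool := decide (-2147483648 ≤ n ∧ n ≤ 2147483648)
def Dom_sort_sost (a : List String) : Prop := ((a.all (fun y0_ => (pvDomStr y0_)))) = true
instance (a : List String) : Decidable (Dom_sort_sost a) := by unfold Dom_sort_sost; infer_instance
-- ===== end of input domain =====

-- B replaces A's single pass over the items (updating a 5-slot array, then filtering
-- empties) with one reversed scan of the list per fixed category; same return value.

-- ===== PORT A =====
def sort_sost (a : List String) : List String :=
  let out : List String := ["", "", "", "", ""]
  let out := a.foldl (fun out i =>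
    let out := if PySem.Str.isIn "Factory New" i then out.set 0 i else out
    let out := if PySem.Str.isIn "Minimal Wear" i then out.set 1 i else out
    let out := if PySem.Str.isIn "Well-Worn" i then out.set 2 i else out
    let out := if PySem.Str.isIn "Field-Tested" i then out.set 3 i else out
    let out := if PySem.Str.isIn "Battle-Scarred" i then out.set 4 i else out
    out) out
  out.filter (fun x => x ≠ "")

-- ===== PORT B =====
def pvCategories : List String :=
  ["Factory New", "Minimal Wear", "Well-Worn", "Field-Tested", "Battle-Scarred"]

def sort_sost_alt (a : List String) : List String :=
  pvCategories.foldl (fun out cat =>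
    match a.reverse.find? (fun i => PySem.Str.isIn cat i) with
    | some hit => out ++ [hit]
    | none => out) []

-- ===== PRECONDITION & SPEC =====
def Spec_sort_sost (a : List String) (out : List String) : Prop := out = sort_sost_alt a
instance (a : List String) (out : List String) : Decidable (Spec_sort_sost a out) := by unfold Spec_sort_sost; infer_instance

-- ===== CLAIM (what is proved, stated in full; the proofs are below) =====
def Claim_equal_sort_sost : Prop := ∀ (a : List String), Dom_sort_sost a → Spec_sort_sost a (sort_sost a)

-- ===== LEMMAS AND PROOFS =====

-- "last item satisfying p, else default": a left fold equals find? on the reverse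
theorem pvFoldl_lastMatch (p : String → Bool) (a : List String) (s : String) :
    a.foldl (fun s i => if p i then i else s) s = (a.reverse.find? p).getD s := by
  induction a generalizing s with
  | nil => simp
  | cons x xs ih =>
    simp only [List.foldl_cons, List.reverse_cons, List.find?_append, ih]
    cases h : xs.reverse.find? p <;> simp [Option.or] <;> split <;> simp

-- A's 5-slot fold splits into five independent last-match folds
theorem pvFold_split (a : List String) (s0 s1 s2 s3 s4 : String) :
    a.foldl (fun out i =>
      let out := if PySem.Str.isIn "Factory New" i then out.set 0 i else out
      let out := if PySem.Str.isIn "Minimal Wear" i then out.set 1 i else out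
      let out := if PySem.Str.isIn "Well-Worn" i then out.set 2 i else out
      let out := if PySem.Str.isIn "Field-Tested" i then out.set 3 i else out
      let out := if PySem.Str.isIn "Battle-Scarred" i then out.set 4 i else out
      out) [s0, s1, s2, s3, s4]
    = [a.foldl (fun s i => if PySem.Str.isIn "Factory New" i then i else s) s0,
       a.foldl (fun s i => if PySem.Str.isIn "Minimal Wear" i then i else s) s1,
       a.foldl (fun s i => if PySem.Str.isIn "Well-Worn" i then i else s) s2,
       a.foldl (fun s i => if PySem.Str.isIn "Field-Tested" i then i else s) s3,
       a.foldl (fun s i => if PySem.Str.isIn "Battle-Scarred" i then i else s) s4] := by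
  induction a generalizing s0 s1 s2 s3 s4 with
  | nil => rfl
  | cons x xs ih =>
    simp only [List.foldl_cons]
    rw [← ih]
    congr 1
    split_ifs <;> rfl

-- a found item contains a nonempty category substring, hence is nonempty
theorem pvFind_ne_empty (cat : String) (hcat : cat.toList ≠ []) (a : List String) (y : String)
    (h : a.find? (fun i => PySem.Str.isIn cat i) = some y) : y ≠ "" := by
  intro he
  subst he
  have hp := List.find?_some h
  rw [PySem.Str.isIn_iff_infix] at hp
  rcases hp with ⟨l, r, hlr⟩
  have := congrArg List.length hlr
  simp at this
  rcases this with ⟨_, h2, _⟩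
  exact hcat (by simp [← h2])

-- one category's contribution: filter on its slot = filterMap on its scan
theorem pvSlot (cat : String) (hcat : cat.toList ≠ []) (a : List String) :
    (if (a.reverse.find? (fun i => PySem.Str.isIn cat i)).getD "" ≠ "" then
        [(a.reverse.find? (fun i => PySem.Str.isIn cat i)).getD ""] else [])
    = (match a.reverse.find? (fun i => PySem.Str.isIn cat i) with
       | some hit => [hit] | none => []) := by
  cases h : a.reverse.find? (fun i => PySem.Str.isIn cat i) with
  | none => simp
  | some y =>
    have := pvFind_ne_empty cat hcat a.reverse y h
    simp [this]

-- ===== VERDICT (by name: the statement is the Claim_ definition above) =====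
theorem sort_sost_spec : Claim_equal_sort_sost := by
  intro a _
  unfold Spec_sort_sost sort_sost sort_sost_alt pvCategories
  simp only [pvFold_split, pvFoldl_lastMatch, List.foldl_cons, List.foldl_nil, List.filter]
  have h0 := pvSlot "Factory New" (by decide) a
  have h1 := pvSlot "Minimal Wear" (by decide) a
  have h2 := pvSlot "Well-Worn" (by decide) a
  have h3 := pvSlot "Field-Tested" (by decide) a
  have h4 := pvSlot "Battle-Scarred" (by decide) a
  cases c0 : a.reverse.find? (fun i => PySem.Str.isIn "Factory New" i) <;>
  cases c1 : a.reverse.find? (fun i => PySem.Str.isIn "Minimal Wear" i) <;>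
  cases c2 : a.reverse.find? (fun i => PySem.Str.isIn "Well-Worn" i) <;>
  cases c3 : a.reverse.find? (fun i => PySem.Str.isIn "Field-Tested" i) <;>
  cases c4 : a.reverse.find? (fun i => PySem.Str.isIn "Battle-Scarred" i) <;>
  · rw [c0] at h0; rw [c1] at h1; rw [c2] at h2; rw [c3] at h3; rw [c4] at h4
    simp only [ne_eq, ite_not] at h0 h1 h2 h3 h4 ⊢
    split_ifs at h0 h1 h2 h3 h4 ⊢ <;> simp_all
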